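-- pv_equiv track=rewrite | github.com/bethanw10/AdventOfCode | Day 4 - Secure Container/Day4.py | is_valid_part_2
-- ===== SOURCE A (Python) =====
-- def is_valid_part_2(n):
--     double_digits = False
--     current_streak = 1
--     prev_num = None
--
--     for num in str(n):
--         if prev_num is not None and num < prev_num:
--             return False
--
--         if prev_num == num:
--             current_streak += 1
--         else:
--             if current_streak == 2:
--                 double_digits = True
--
--             current_streak = 1
--
--         prev_num = num
--
--     return double_digits or current_streak == 2
-- ===== SOURCE B (Python) =====
-- from itertools import groupby
--
--
-- def is_valid_part_2(n):
--     s = str(n)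
--     return s == ''.join(sorted(s)) and any(
--         sum(1 for _ in g) == 2 for _, g in groupby(s))
-- ===== Notes on version B (the rewrite author's own statement) =====
-- stated objective: idiomatic
-- what changed: Replaced A's single fused streak-tracking loop (prev_num/current_streak/double_digits with early return) by two separate declarative passes: a sortedness check via s == ''.join(sorted(s)) and a run-length test via itertools.groupby.
import Mathlib
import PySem

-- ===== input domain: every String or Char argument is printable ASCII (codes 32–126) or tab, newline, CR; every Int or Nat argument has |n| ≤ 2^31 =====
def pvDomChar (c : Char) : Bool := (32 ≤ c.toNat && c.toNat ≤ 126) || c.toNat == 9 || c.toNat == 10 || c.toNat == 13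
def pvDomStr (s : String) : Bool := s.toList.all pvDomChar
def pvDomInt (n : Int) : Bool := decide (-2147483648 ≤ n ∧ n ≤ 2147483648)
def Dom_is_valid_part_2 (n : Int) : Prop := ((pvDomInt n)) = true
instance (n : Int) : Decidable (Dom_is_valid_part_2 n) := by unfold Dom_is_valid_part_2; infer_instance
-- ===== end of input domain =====

-- B replaces A's fused streak-tracking loop (early return, prev/streak state) by two
-- declarative passes: a sortedness comparison and a groupby run-length test (idiomatic).


-- ===== PORT A =====
-- the for-loop of A, with its state (double_digits, current_streak, prev_num); early 'return False' = the 'false' branch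
def pvLoopA : List Char → Bool → Int → Option Char → Bool
  | [], dd, cs, _ => dd || (cs == 2)
  | c :: rest, dd, cs, prev =>
    if (match prev with | some p => decide (c < p) | none => false) then false
    else if prev == some c then pvLoopA rest dd (cs + 1) (some c)
    else pvLoopA rest (if cs == 2 then true else dd) 1 (some c)

def is_valid_part_2 (n : Int) : Bool :=
  pvLoopA (PySem.Int.toStr n).toList false 1 none

-- ===== PORT B =====
-- run lengths of consecutive equal chars, = [len(list(g)) for _, g in groupby(s)]
def pvRunLens (c : Char) (k : Int) : List Char → List Int
  | [] => [k]
  | d :: rest => if d == c then pvRunLens c (k + 1) rest else k :: pvRunLens d 1 rest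

def is_valid_part_2_alt (n : Int) : Bool :=
  decide ((PySem.Int.toStr n).toList
      = PySem.List.sorted (PySem.Int.toStr n).toList (fun x => x) false) &&
    (match (PySem.Int.toStr n).toList with
     | [] => false
     | c :: rest => (pvRunLens c 1 rest).any (fun k => k == 2))

-- ===== PRECONDITION & SPEC =====
def Spec_is_valid_part_2 (n : Int) (out : Bool) : Prop := out = is_valid_part_2_alt n
instance (n : Int) (out : Bool) : Decidable (Spec_is_valid_part_2 n out) := by unfold Spec_is_valid_part_2; infer_instance

-- ===== CLAIM (what is proved, stated in full; the proofs are below) =====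
def Claim_equal_is_valid_part_2 : Prop := ∀ (n : Int), Dom_is_valid_part_2 n → Spec_is_valid_part_2 n (is_valid_part_2 n)

-- ===== LEMMAS AND PROOFS =====

-- A's loop, once past the first char, is: "the rest stays non-decreasing" AND
-- "double_digits already, or some run (counting the current streak) has length exactly 2".
theorem pvLoopA_char (rest : List Char) (p : Char) (dd : Bool) (cs : Int) :
    pvLoopA rest dd cs (some p) =
      (decide (List.Pairwise (· ≤ ·) (p :: rest)) &&
        (dd || (pvRunLens p cs rest).any (fun k => k == 2))) := by
  induction rest generalizing p dd cs with
  | nil => simp [pvLoopA, pvRunLens]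
  | cons c rest ih =>
    have hpair : (decide (List.Pairwise (· ≤ ·) (p :: c :: rest)))
        = ((decide (p ≤ c)) && decide (List.Pairwise (· ≤ ·) (c :: rest))) := by
      rw [← Bool.decide_and]
      exact decide_eq_decide.mpr List.pairwise_cons_cons_iff_of_trans
    rw [hpair]
    by_cases hlt : c < p
    · have hnle : ¬ p ≤ c := not_le.mpr hlt
      simp [pvLoopA, hlt, hnle]
    · have hpc : p ≤ c := le_of_not_gt hlt
      by_cases heq : c = p
      · subst heq
        simp [pvLoopA, pvRunLens, ih]
      · have hne : ¬ (p = c) := fun h => heq h.symm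
        simp [pvLoopA, hlt, hne, heq, pvRunLens, ih, hpc]
        cases dd
        · by_cases h2 : cs = 2
          · simp [h2, Bool.or_comm]
          · have hcs : (cs == 2) = false := beq_eq_false_iff_ne.mpr h2
            simp only [hcs, decide_eq_false h2, Bool.false_or]
        · simp

theorem pvSorted_iff_pairwise (s : List Char) :
    (s = PySem.List.sorted s (fun x => x) false) ↔ List.Pairwise (· ≤ ·) s := by
  constructor
  · intro h
    have := PySem.List.sorted_pairwise (xs := s) (key := fun x => x)
    rw [← h] at this
    exact this
  · intro h
    exact (PySem.List.sorted_eq_self_of_pairwise s (fun x => x) h).symm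

-- ===== VERDICT (by name: the statement is the Claim_ definition above) =====
theorem is_valid_part_2_spec : Claim_equal_is_valid_part_2 := by
  intro n _
  unfold Spec_is_valid_part_2 is_valid_part_2 is_valid_part_2_alt
  cases hs : (PySem.Int.toStr n).toList with
  | nil => simp [pvLoopA]
  | cons c rest =>
    have h1 : pvLoopA (c :: rest) false 1 none = pvLoopA rest false 1 (some c) := by
      simp [pvLoopA]
    rw [h1, pvLoopA_char]
    by_cases hch : List.Pairwise (· ≤ ·) (c :: rest)
    · have hd1 : (decide (List.Pairwise (· ≤ ·) (c :: rest))) = true := decide_eq_true hch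
      have hd2 : (decide (c :: rest = PySem.List.sorted (c :: rest) (fun x => x) false)) = true :=
        decide_eq_true ((pvSorted_iff_pairwise (c :: rest)).mpr hch)
      rw [hd1, hd2]; simp
    · have hd1 : (decide (List.Pairwise (· ≤ ·) (c :: rest))) = false := decide_eq_false hch
      have hd2 : (decide (c :: rest = PySem.List.sorted (c :: rest) (fun x => x) false)) = false :=
        decide_eq_false (fun h => hch ((pvSorted_iff_pairwise (c :: rest)).mp h))
      rw [hd1, hd2]; simp
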